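-- pv_equiv track=rewrite | github.com/Deniskoltovich/BSUIR-stuff | MRZVIS/lab1/operations.py | binary_multiplication_generator
-- ===== SOURCE A (Python) =====
-- NUM_SIZE = 4
--
-- def binary_addition(num1: list, num2: list):
--     result = []
--     carry = 0
--
--     if len(num1) < len(num2):
--         num1 = [0] * (len(num2) - len(num1)) + num1
--     else:
--         num2 = [0] * (len(num1) - len(num2)) + num2
--
--     for i in range(len(num1) - 1, -1, -1):
--         bit_sum = num1[i] + num2[i] + carry
--         result.insert(0, bit_sum % 2)
--
--         carry = bit_sum // 2
--
--     if carry: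
--         result.insert(0, carry)
--
--     return result
--
-- def binary_multiplication_generator(multiplier, multiplicand):
--     if multiplier == [None] or multiplicand == [None]:
--         for _ in range(NUM_SIZE):
--             yield None, None
--
--     partial_addition = [0] * 8
--     for i in range(len(multiplicand) - 1, -1, -1):
--         # умножаем multiplier на разряд multiplicand и делаем сдвиг влево (0 справа)
--         partial_product = [multiplicand[i] * multiplier_i for multiplier_i in multiplier] + [0] * (len(multiplicand) - 1 - i)
--
--         # Дополняем нулями слева
--         partial_product = [0] * (8 - len(partial_product)) + partial_product
--
--         partial_addition = binary_addition(partial_product, partial_addition)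
--         yield partial_product, partial_addition
-- ===== SOURCE B (Python) =====
-- def binary_multiplication_generator(multiplier, multiplicand):
--     acc = 0     # running sum, kept as one integer instead of a digit list
--     width = 8   # number of digit positions currently used to display it
--     for i in range(len(multiplicand) - 1, -1, -1):
--         partial_product = [multiplicand[i] * m for m in multiplier] + [0] * (len(multiplicand) - 1 - i)
--         partial_product = [0] * (8 - len(partial_product)) + partial_product
--
--         value = 0
--         for d in partial_product:
--             value = 2 * value + d
--         acc += value
--
--         width = max(len(partial_product), width)
--         partial_addition = [(acc >> k) & 1 for k in range(width - 1, -1, -1)]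
--         carry = acc >> width
--         if carry:
--             partial_addition.insert(0, carry)
--             width += 1
--         yield partial_product, partial_addition
-- ===== Notes on version B (the rewrite author's own statement) =====
-- stated objective: alternative
-- what changed: Replaced the digit-by-digit binary_addition helper (list padding, reversed index loop, carry insertion into a result list) by a single integer accumulator with a tracked display width: each step adds the partial product's value, renders the accumulator's low bits MSB-first and prepends the overflow carry when nonzero.
import Mathlib
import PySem

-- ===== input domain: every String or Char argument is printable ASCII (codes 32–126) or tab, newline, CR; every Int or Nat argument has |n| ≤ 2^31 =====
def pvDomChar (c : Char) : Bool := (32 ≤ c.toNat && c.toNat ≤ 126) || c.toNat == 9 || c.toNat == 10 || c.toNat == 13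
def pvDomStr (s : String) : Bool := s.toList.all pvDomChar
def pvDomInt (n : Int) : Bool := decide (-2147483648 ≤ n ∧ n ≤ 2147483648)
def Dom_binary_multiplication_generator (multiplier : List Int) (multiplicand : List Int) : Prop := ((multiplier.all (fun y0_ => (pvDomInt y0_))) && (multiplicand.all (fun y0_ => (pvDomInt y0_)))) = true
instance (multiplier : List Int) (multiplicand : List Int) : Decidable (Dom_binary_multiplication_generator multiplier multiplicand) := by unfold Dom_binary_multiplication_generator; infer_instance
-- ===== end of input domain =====

-- B keeps the running sum as one integer (plus its display width) instead of a digit list added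
-- digit by digit (alternative decomposition, similar cost). The '[None]' branch of the Python
-- generator is unrepresentable for List Int inputs, so both ports omit it.

-- ===== PORT A =====
-- helper: the loop body of binary_addition's for-loop (result grows by insert(0,·) = cons)
def pvAddStep (num1 num2 : List Int) (st : List Int × Int) (i : Int) : List Int × Int :=
  let bit_sum := PySem.List.pyGetD num1 i 0 + PySem.List.pyGetD num2 i 0 + st.2
  (PySem.Int.mod bit_sum 2 :: st.1, PySem.Int.floordiv bit_sum 2)

def binary_addition (num1 num2 : List Int) : List Int :=
  let num1' := if num1.length < num2.length then List.replicate (num2.length - num1.length) 0 ++ num1 else num1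
  let num2' := if num1.length < num2.length then num2 else List.replicate (num1.length - num2.length) 0 ++ num2
  let st := (PySem.List.pyRange ((num1'.length : Int) - 1) (-1) (-1)).foldl (pvAddStep num1' num2') ([], 0)
  if st.2 ≠ 0 then st.2 :: st.1 else st.1

def binary_multiplication_generator (multiplier : List Int) (multiplicand : List Int) : List (List Int × List Int) :=
  ((PySem.List.pyRange ((multiplicand.length : Int) - 1) (-1) (-1)).foldl
    (fun (st : List Int × List (List Int × List Int)) i =>
      let pp := multiplier.map (fun m => PySem.List.pyGetD multiplicand i 0 * m)
                  ++ List.replicate ((multiplicand.length : Int) - 1 - i).toNat 0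
      let pp := List.replicate (8 - pp.length) 0 ++ pp
      let pa := binary_addition pp st.1
      (pa, st.2 ++ [(pp, pa)]))
    (List.replicate 8 0, [])).2

-- ===== PORT B =====
-- '(acc >> k) & 1' and 'acc >> width' are ported exactly: Python's >> is floor division by a
-- power of two and '& 1' is mod 2, for every int; k and width are never negative along the loop,
-- so '.toNat' in the exponent is exact. 'if carry:' is carry ≠ 0; insert(0, c) is cons.
def binary_multiplication_generator_alt (multiplier : List Int) (multiplicand : List Int) : List (List Int × List Int) :=
  ((PySem.List.pyRange ((multiplicand.length : Int) - 1) (-1) (-1)).foldl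
    (fun (st : Int × Int × List (List Int × List Int)) i =>
      let pp := multiplier.map (fun m => PySem.List.pyGetD multiplicand i 0 * m)
                  ++ List.replicate ((multiplicand.length : Int) - 1 - i).toNat 0
      let pp := List.replicate (8 - pp.length) 0 ++ pp
      let value := pp.foldl (fun v d => 2 * v + d) 0
      let acc := st.1 + value
      let width := max (pp.length : Int) st.2.1
      let pa := (PySem.List.pyRange (width - 1) (-1) (-1)).map
                  (fun k => PySem.Int.mod (PySem.Int.floordiv acc (2 ^ k.toNat)) 2)
      let carry := PySem.Int.floordiv acc (2 ^ width.toNat)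
      let pa := if carry ≠ 0 then carry :: pa else pa
      let width := if carry ≠ 0 then width + 1 else width
      (acc, width, st.2.2 ++ [(pp, pa)]))
    (0, 8, [])).2.2

-- ===== PRECONDITION & SPEC =====
def Spec_binary_multiplication_generator (multiplier : List Int) (multiplicand : List Int) (out : List (List Int × List Int)) : Prop := out = binary_multiplication_generator_alt multiplier multiplicand
instance (multiplier : List Int) (multiplicand : List Int) (out : List (List Int × List Int)) : Decidable (Spec_binary_multiplication_generator multiplier multiplicand out) := by unfold Spec_binary_multiplication_generator; infer_instance

-- ===== CLAIM (what is proved, stated in full; the proofs are below) =====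
def Claim_equal_binary_multiplication_generator : Prop := ∀ (multiplier : List Int) (multiplicand : List Int), Dom_binary_multiplication_generator multiplier multiplicand → Spec_binary_multiplication_generator multiplier multiplicand (binary_multiplication_generator multiplier multiplicand)

-- ===== LEMMAS AND PROOFS =====

-- value of an MSB-first digit list (digits may be arbitrary integers)
def pvVal (xs : List Int) : Int := xs.foldl (fun v d => 2 * v + d) 0

-- MSB-first k low bits of s
def pvBits (s : Int) : Nat → List Int
  | 0 => []
  | k + 1 => pvBits (PySem.Int.floordiv s 2) k ++ [PySem.Int.mod s 2]

theorem pvVal_replicate_zero (m : Nat) : pvVal (List.replicate m 0) = 0 := by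
  induction m with
  | zero => rfl
  | succ k ih => simpa [pvVal, List.replicate_succ, List.foldl_cons] using ih

theorem pvVal_pad (m : Nat) (xs : List Int) :
    pvVal (List.replicate m 0 ++ xs) = pvVal xs := by
  have h : (List.replicate m 0 : List Int).foldl (fun v d => 2 * v + d) 0 = 0 :=
    pvVal_replicate_zero m
  simp [pvVal, List.foldl_append, h]

theorem pvVal_append_singleton (xs : List Int) (d : Int) :
    pvVal (xs ++ [d]) = 2 * pvVal xs + d := by
  simp [pvVal, List.foldl_append]

theorem length_pvBits (s : Int) (k : Nat) : (pvBits s k).length = k := by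
  induction k generalizing s with
  | zero => rfl
  | succ k ih => simp [pvBits, ih]

theorem pvEdivEdiv (s : Int) (k : Nat) : s / 2 / 2 ^ k = s / 2 ^ (k + 1) := by
  rw [Int.ediv_ediv_of_nonneg (by norm_num : (0:Int) ≤ 2), pow_succ, mul_comm]

theorem floordiv_floordiv_two (s : Int) (k : Nat) :
    PySem.Int.floordiv (PySem.Int.floordiv s 2) (2 ^ k) = PySem.Int.floordiv s (2 ^ (k + 1)) := by
  rw [PySem.Int.floordiv_eq_ediv_of_pos (a := s) (by norm_num : (0:Int) < 2),
      PySem.Int.floordiv_eq_ediv_of_pos (by positivity),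
      PySem.Int.floordiv_eq_ediv_of_pos (by positivity)]
  exact pvEdivEdiv s k

theorem pvVal_pvBits (s : Int) (k : Nat) :
    pvVal (pvBits s k) + PySem.Int.floordiv s (2 ^ k) * 2 ^ k = s := by
  induction k generalizing s with
  | zero => simp [pvBits, pvVal]
  | succ k ih =>
    have h2 := ih (PySem.Int.floordiv s 2)
    have hmul := PySem.Int.floordiv_mul_add_mod s 2
    simp only [pvBits]
    rw [pvVal_append_singleton, ← floordiv_floordiv_two]
    linear_combination (2:Int) * h2 + hmul

theorem pvVal_cons (c : Int) (l : List Int) : pvVal (c :: l) = c * 2 ^ l.length + pvVal l := by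
  have h : ∀ (l : List Int) (a : Int),
      l.foldl (fun v d => 2 * v + d) a = a * 2 ^ l.length + pvVal l := by
    intro l
    induction l with
    | nil => intro a; simp [pvVal]
    | cons d t ih =>
      intro a
      have h0 : pvVal (d :: t) = d * 2 ^ t.length + pvVal t := by simpa [pvVal] using ih d
      simp only [List.foldl_cons, List.length_cons]
      rw [ih (2 * a + d), h0, pow_succ]; ring
  simpa [pvVal] using h l c

-- the addition loop of binary_addition, characterised
theorem pvAddLoop (xs ys : List Int) (hl : xs.length = ys.length) (k : Nat) (hk : k ≤ xs.length)
    (r : List Int) (c : Int) :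
    (PySem.List.pyRange ((k : Int) - 1) (-1) (-1)).foldl (pvAddStep xs ys) (r, c)
    = (pvBits (pvVal (xs.take k) + pvVal (ys.take k) + c) k ++ r,
       PySem.Int.floordiv (pvVal (xs.take k) + pvVal (ys.take k) + c) (2 ^ k)) := by
  induction k generalizing r c with
  | zero => simp [pvBits, pvVal]
  | succ k ih =>
    have hkx : k < xs.length := by omega
    have hky : k < ys.length := by omega
    rw [PySem.List.pyRange_neg_one_cons (by push_cast; omega : (-1:Int) < ((k+1 : Nat) : Int) - 1)]
    have hstep : pvAddStep xs ys (r, c) (((k + 1 : Nat) : Int) - 1)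
        = (PySem.Int.mod (xs[k] + ys[k] + c) 2 :: r, PySem.Int.floordiv (xs[k] + ys[k] + c) 2) := by
      have hki : ((k + 1 : Nat) : Int) - 1 = (k : Int) := by push_cast; ring
      rw [hki]
      simp [pvAddStep, PySem.List.pyGetD_natCast, List.getD_eq_getElem?_getD,
        List.getElem?_eq_getElem hkx, List.getElem?_eq_getElem hky]
    have harg : ((k + 1 : Nat) : Int) - 1 - 1 = (k : Int) - 1 := by push_cast; ring
    rw [List.foldl_cons, hstep, harg, ih (by omega)]
    have htakex : xs.take (k+1) = xs.take k ++ [xs[k]] := List.take_succ_eq_append_getElem hkx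
    have htakey : ys.take (k+1) = ys.take k ++ [ys[k]] := List.take_succ_eq_append_getElem hky
    set d : Int := xs[k] + ys[k] with hd
    set Vk : Int := pvVal (xs.take k) + pvVal (ys.take k) with hVk
    set S : Int := pvVal (xs.take (k+1)) + pvVal (ys.take (k+1)) + c with hS
    have hSe : S = 2 * Vk + d + c := by
      rw [hS, htakex, htakey, pvVal_append_singleton, pvVal_append_singleton, hVk, hd]; ring
    have h1 : Vk + PySem.Int.floordiv (d + c) 2 = PySem.Int.floordiv S 2 := by
      rw [hSe, PySem.Int.floordiv_eq_ediv_of_pos (by norm_num),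
          PySem.Int.floordiv_eq_ediv_of_pos (by norm_num)]
      rw [show 2 * Vk + d + c = d + c + Vk * 2 by ring, Int.add_mul_ediv_right _ _ (by norm_num)]
      ring
    have h2 : PySem.Int.mod (d + c) 2 = PySem.Int.mod S 2 := by
      rw [hSe, PySem.Int.mod_eq_emod_of_pos (by norm_num), PySem.Int.mod_eq_emod_of_pos (by norm_num)]
      omega
    rw [h1, h2]
    simp [pvBits, List.append_assoc, pvEdivEdiv]

-- binary_addition, characterised: carry then the bits of the digit-value sum
theorem binadd_char (xs ys : List Int) :
    binary_addition xs ys =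
      (if PySem.Int.floordiv (pvVal xs + pvVal ys) (2 ^ (max xs.length ys.length)) ≠ 0
       then PySem.Int.floordiv (pvVal xs + pvVal ys) (2 ^ (max xs.length ys.length))
              :: pvBits (pvVal xs + pvVal ys) (max xs.length ys.length)
       else pvBits (pvVal xs + pvVal ys) (max xs.length ys.length)) := by
  unfold binary_addition
  by_cases h : xs.length < ys.length
  · simp only [if_pos h]
    have hlen : (List.replicate (ys.length - xs.length) (0:Int) ++ xs).length = ys.length := by
      simp; omega
    have hmax : max xs.length ys.length = ys.length := by omega
    rw [hlen, pvAddLoop _ _ (by simp [hlen]) ys.length (by simp [hlen]) [] 0,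
        List.take_of_length_le (by simp [hlen]), List.take_of_length_le (by simp)]
    simp [pvVal_pad, hmax, add_zero]
  · simp only [if_neg h]
    have hlen : (List.replicate (xs.length - ys.length) (0:Int) ++ ys).length = xs.length := by
      simp; omega
    have hmax : max xs.length ys.length = xs.length := by omega
    rw [pvAddLoop _ _ (by simp [hlen]) xs.length (by simp) [] 0,
        List.take_of_length_le (by simp), List.take_of_length_le (by simp [hlen])]
    simp [pvVal_pad, hmax, add_zero]

-- the top bit: pvBits s (k+1) splits off the bit at position k
theorem pvBits_succ_high (s : Int) (k : Nat) :
    pvBits s (k + 1) = PySem.Int.mod (PySem.Int.floordiv s (2 ^ k)) 2 :: pvBits s k := by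
  induction k generalizing s with
  | zero =>
    simp [pvBits]
  | succ k ih =>
    show pvBits (PySem.Int.floordiv s 2) (k + 1) ++ [PySem.Int.mod s 2] = _
    rw [ih (PySem.Int.floordiv s 2), floordiv_floordiv_two]
    simp [pvBits]

-- B's bit comprehension is pvBits
theorem pvBits_map_range (k : Nat) (s : Int) :
    (PySem.List.pyRange ((k : Int) - 1) (-1) (-1)).map
      (fun j => PySem.Int.mod (PySem.Int.floordiv s (2 ^ j.toNat)) 2) = pvBits s k := by
  induction k generalizing s with
  | zero =>
    rw [PySem.List.pyRange_neg_one_eq_nil (by norm_num)]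
    simp [pvBits]
  | succ k ih =>
    rw [PySem.List.pyRange_neg_one_cons (by push_cast; omega : (-1:Int) < ((k+1 : Nat) : Int) - 1)]
    have h1 : ((k + 1 : Nat) : Int) - 1 = (k : Int) := by push_cast; ring
    rw [List.map_cons, h1, ih s, pvBits_succ_high]
    simp

-- one step: binary_addition is the carry-then-bits rendering of the summed value
theorem pvStep (pp pa : List Int) :
    (binary_addition pp pa =
      (if PySem.Int.floordiv (pvVal pa + pvVal pp) (2 ^ (max pp.length pa.length)) ≠ 0
       then PySem.Int.floordiv (pvVal pa + pvVal pp) (2 ^ (max pp.length pa.length))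
              :: pvBits (pvVal pa + pvVal pp) (max pp.length pa.length)
       else pvBits (pvVal pa + pvVal pp) (max pp.length pa.length)))
    ∧ pvVal (binary_addition pp pa) = pvVal pa + pvVal pp
    ∧ ((binary_addition pp pa).length : Int) =
      (if PySem.Int.floordiv (pvVal pa + pvVal pp) (2 ^ (max pp.length pa.length)) ≠ 0
       then ((max pp.length pa.length : Nat) : Int) + 1 else ((max pp.length pa.length : Nat) : Int)) := by
  have hchar := binadd_char pp pa
  rw [show pvVal pp + pvVal pa = pvVal pa + pvVal pp from by ring] at hchar
  set s : Int := pvVal pa + pvVal pp with hs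
  set n : Nat := max pp.length pa.length with hn
  refine ⟨hchar, ?_, ?_⟩
  · rw [hchar]
    by_cases hc : PySem.Int.floordiv s (2 ^ n) = 0
    · rw [if_neg (by simpa using hc)]
      have hv := pvVal_pvBits s n
      rw [hc] at hv; simpa using hv
    · rw [if_pos hc, pvVal_cons, length_pvBits]
      have hv := pvVal_pvBits s n
      linarith [hv]
  · rw [hchar]
    by_cases hc : PySem.Int.floordiv s (2 ^ n) = 0
    · rw [if_neg (by simpa using hc), if_neg (by simpa using hc), length_pvBits]
    · rw [if_pos hc, if_pos hc]
      simp [length_pvBits]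

-- the two main loops agree step for step
theorem pvMainLoop (multiplier multiplicand : List Int)
    (l : List Int) (pa : List Int) (acc width : Int) (outA outB : List (List Int × List Int))
    (h1 : pvVal pa = acc) (h2 : (pa.length : Int) = width) (h5 : outA = outB) :
    (l.foldl
      (fun (st : List Int × List (List Int × List Int)) i =>
        let pp := multiplier.map (fun m => PySem.List.pyGetD multiplicand i 0 * m)
                    ++ List.replicate ((multiplicand.length : Int) - 1 - i).toNat 0
        let pp := List.replicate (8 - pp.length) 0 ++ pp
        let pa := binary_addition pp st.1
        (pa, st.2 ++ [(pp, pa)]))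
      (pa, outA)).2
    = (l.foldl
      (fun (st : Int × Int × List (List Int × List Int)) i =>
        let pp := multiplier.map (fun m => PySem.List.pyGetD multiplicand i 0 * m)
                    ++ List.replicate ((multiplicand.length : Int) - 1 - i).toNat 0
        let pp := List.replicate (8 - pp.length) 0 ++ pp
        let value := pp.foldl (fun v d => 2 * v + d) 0
        let acc := st.1 + value
        let width := max (pp.length : Int) st.2.1
        let pa := (PySem.List.pyRange (width - 1) (-1) (-1)).map
                    (fun k => PySem.Int.mod (PySem.Int.floordiv acc (2 ^ k.toNat)) 2)
        let carry := PySem.Int.floordiv acc (2 ^ width.toNat)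
        let pa := if carry ≠ 0 then carry :: pa else pa
        let width := if carry ≠ 0 then width + 1 else width
        (acc, width, st.2.2 ++ [(pp, pa)]))
      (acc, width, outB)).2.2 := by
  induction l generalizing pa acc width outA outB with
  | nil => simpa using h5
  | cons i t ih =>
    simp only [List.foldl_cons]
    set pp : List Int := List.replicate (8 - ((multiplier.map (fun m => PySem.List.pyGetD multiplicand i 0 * m)
        ++ List.replicate ((multiplicand.length : Int) - 1 - i).toNat 0).length)) (0:Int)
        ++ (multiplier.map (fun m => PySem.List.pyGetD multiplicand i 0 * m)
        ++ List.replicate ((multiplicand.length : Int) - 1 - i).toNat 0) with hpp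
    have hv : pvVal pp = pp.foldl (fun v d => 2 * v + d) 0 := rfl
    have hacc : acc + pp.foldl (fun v d => 2 * v + d) 0 = pvVal pa + pvVal pp := by
      rw [← hv, ← h1]
    have hw : max ((pp.length : Int)) width = ((max pp.length pa.length : Nat) : Int) := by
      rw [← h2]; simp [Nat.cast_max]
    have hwt : (max ((pp.length : Int)) width).toNat = max pp.length pa.length := by
      rw [hw]; exact Int.toNat_natCast _
    obtain ⟨hA, hval, hlen⟩ := pvStep pp pa
    refine ih _ _ _ _ _ ?_ ?_ ?_
    · rw [hval, h1, hv]
    · rw [hlen, hacc, hwt, hw]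
    · rw [h5, hA, hacc, hwt, hw, pvBits_map_range]

-- ===== VERDICT (by name: the statement is the Claim_ definition above) =====
theorem binary_multiplication_generator_spec : Claim_equal_binary_multiplication_generator := by
  intro multiplier multiplicand _hdom
  unfold Spec_binary_multiplication_generator binary_multiplication_generator binary_multiplication_generator_alt
  exact pvMainLoop multiplier multiplicand _ _ _ _ _ _ (by decide) (by simp) rfl
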